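-- pv_equiv track=rewrite | github.com/anurgbht/BDS_modelling | raise_alarm_20.py | get_bunch
-- ===== SOURCE A (Python) =====
-- def get_bunch(col):
--     count = 1
--     tt = [count]
--     for i in range(len(col)-1):
--         if col[i+1] - col[i] > 20:
--             count += 1
--             tt.append(count)
--         else:
--             tt.append(count)
--     return tt
-- ===== SOURCE B (Python) =====
-- def get_bunch(col):
--     # Segment view: find the boundary positions where a new run starts (gap > 20),
--     # then emit each run as a block of its label via run-length construction.
--     cuts = [i for i in range(1, len(col)) if col[i] - col[i - 1] > 20]
--     edges = [0] + cuts + [len(col)]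
--     out = []
--     for label, (lo, hi) in enumerate(zip(edges, edges[1:]), 1):
--         out += [label] * (hi - lo)
--     return out
-- ===== Notes on version B (the rewrite author's own statement) =====
-- stated objective: alternative
-- what changed: Instead of threading a counter through an element-by-element if/else loop, B locates the run boundaries (gaps > 20) once, builds the edge list of segment bounds, and emits each run as a block of its label by run-length construction.
-- intended difference: On the empty list A returns a spurious one-element label list (its seeded counter survives the empty loop) while B returns the empty list, the intended labelling of an input with no elements to label. — e.g. on get_bunch([]): A returns [1], B returns []
import Mathlib
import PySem

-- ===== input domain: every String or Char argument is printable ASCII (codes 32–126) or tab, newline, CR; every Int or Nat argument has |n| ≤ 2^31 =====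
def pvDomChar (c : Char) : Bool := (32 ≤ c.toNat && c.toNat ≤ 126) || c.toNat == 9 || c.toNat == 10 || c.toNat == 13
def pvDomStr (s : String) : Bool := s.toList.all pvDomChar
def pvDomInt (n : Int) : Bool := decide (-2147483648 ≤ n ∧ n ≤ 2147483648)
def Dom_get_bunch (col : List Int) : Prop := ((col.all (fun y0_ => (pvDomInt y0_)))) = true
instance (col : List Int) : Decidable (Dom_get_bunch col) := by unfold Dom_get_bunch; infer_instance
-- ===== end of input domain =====

-- ===== PORT A =====
-- B rebuilds the labels by locating the run boundaries and emitting each run as a block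
-- (run-length construction) instead of threading a counter element by element; same O(n) cost.
def get_bunch (col : List Int) : List Int :=
  -- count = 1; tt = [count]; for i in range(len(col)-1): if col[i+1]-col[i] > 20: count += 1; tt.append(count) else tt.append(count)
  -- indices i and i+1 are always in range inside the loop, so pyGetD's default is never read
  let r := (PySem.List.pyRange 0 ((col.length : Int) - 1) 1).foldl
    (fun (st : Int × List Int) i =>
      if PySem.List.pyGetD col (i + 1) 0 - PySem.List.pyGetD col i 0 > 20 then
        (st.1 + 1, st.2 ++ [st.1 + 1])
      else
        (st.1, st.2 ++ [st.1]))
    (1, [1])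
  r.2

-- ===== PORT B =====
def get_bunch_alt (col : List Int) : List Int :=
  -- cuts = [i for i in range(1, len(col)) if col[i] - col[i-1] > 20]
  let cuts := (PySem.List.pyRange 1 (col.length : Int) 1).filter
    (fun i => decide (PySem.List.pyGetD col i 0 - PySem.List.pyGetD col (i - 1) 0 > 20))
  -- edges = [0] + cuts + [len(col)]
  let edges := [(0 : Int)] ++ cuts ++ [(col.length : Int)]
  -- for label, (lo, hi) in enumerate(zip(edges, edges[1:]), 1): out += [label] * (hi - lo)
  (PySem.List.enumerate (edges.zip (edges.drop 1)) 1).foldl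
    (fun (out : List Int) p => out ++ List.replicate (p.2.2 - p.2.1).toNat p.1) []

-- ===== PRECONDITION & SPEC =====
-- On the empty list A returns a spurious one-element label list (its seeded counter survives the
-- empty loop) although there is no element to label; B returns the empty list, the intended labelling.
def D_get_bunch (col : List Int) : Prop := col = []
instance (col : List Int) : Decidable (D_get_bunch col) := by unfold D_get_bunch; infer_instance
def Spec_get_bunch (col : List Int) (out : List Int) : Prop := ¬ D_get_bunch col → out = get_bunch_alt col
instance (col : List Int) (out : List Int) : Decidable (Spec_get_bunch col out) := by unfold Spec_get_bunch; infer_instance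
def pvDiffWitness_get_bunch : List Int := []
def pvDiffWitnessOut_get_bunch : (List Int) × (List Int) := ([1], [])

-- ===== CLAIM (what is proved, stated in full; the proofs are below) =====
def Claim_unchanged_get_bunch : Prop := ∀ (col : List Int), Dom_get_bunch col → Spec_get_bunch col (get_bunch col)
def Claim_changed_get_bunch : Prop := Dom_get_bunch (pvDiffWitness_get_bunch) ∧ D_get_bunch (pvDiffWitness_get_bunch) ∧ get_bunch (pvDiffWitness_get_bunch) = pvDiffWitnessOut_get_bunch.1 ∧ get_bunch_alt (pvDiffWitness_get_bunch) = pvDiffWitnessOut_get_bunch.2 ∧ pvDiffWitnessOut_get_bunch.1 ≠ pvDiffWitnessOut_get_bunch.2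
def Claim_exact_get_bunch : Prop := ∀ (col : List Int), Dom_get_bunch col → D_get_bunch col → get_bunch col ≠ get_bunch_alt col

-- ===== LEMMAS AND PROOFS =====

-- A's loop, rebased onto the list of consecutive gaps.
def pvAfold (gs : List Int) (st : Int × List Int) : Int × List Int :=
  gs.foldl (fun st g =>
    if g > 20 then (st.1 + 1, st.2 ++ [st.1 + 1]) else (st.1, st.2 ++ [st.1])) st

-- B's cut positions, rebased onto the gaps list (cut i+1 ↔ gap i exceeds 20).
def pvCuts (gs : List Int) : List Int :=
  ((List.range gs.length).filter (fun k => decide (gs.getD k 0 > 20))).map (fun k : Nat => (1 : Int) + (k : Int))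

-- Run-length emission along consecutive edge pairs, structurally.
def pvSegs (p : Int) (es : List Int) (l : Int) : List Int :=
  match es with
  | [] => []
  | e :: es => List.replicate (e - p).toNat l ++ pvSegs e es (l + 1)

theorem pv_fold_segs (es : List Int) : ∀ (e0 l : Int) (acc : List Int),
    (PySem.List.enumerate ((e0 :: es).zip es) l).foldl
      (fun (out : List Int) p => out ++ List.replicate (p.2.2 - p.2.1).toNat p.1) acc
    = acc ++ pvSegs e0 es l := by
  induction es with
  | nil => intro e0 l acc; simp [pvSegs, PySem.List.enumerate_nil]
  | cons e es ih =>
    intro e0 l acc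
    simp only [List.zip_cons_cons, PySem.List.enumerate_cons, List.foldl_cons, pvSegs]
    rw [ih e (l + 1)]
    simp [List.append_assoc]

theorem pv_segs_snoc (cs : List Int) : ∀ (p l e : Int),
    pvSegs p (cs ++ [e]) l
    = pvSegs p cs l ++ List.replicate ((e - cs.getLastD p).toNat) (l + (cs.length : Int)) := by
  induction cs with
  | nil => intro p l e; simp [pvSegs]
  | cons c cs ih =>
    intro p l e
    simp only [List.cons_append, pvSegs, ih c (l + 1) e, List.getLastD_cons, List.length_cons,
      List.append_assoc]
    congr 3
    push_cast
    ring

theorem pv_cuts_snoc (gs : List Int) (g : Int) :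
    pvCuts (gs ++ [g]) = pvCuts gs ++ (if g > 20 then [(1 : Int) + (gs.length : Int)] else []) := by
  unfold pvCuts
  simp only [List.length_append, List.length_singleton]
  rw [List.range_succ, List.filter_append]
  rw [List.filter_congr (l := List.range gs.length)
      (q := fun k => decide (gs.getD k 0 > 20))
      (by intro k hk
          have hk' : k < gs.length := List.mem_range.mp hk
          simp [List.getD_eq_getElem?_getD, List.getElem?_append_left hk'])]
  by_cases hg : g > 20 <;>
    simp [List.getD_eq_getElem?_getD, hg]

theorem pv_cuts_last_le (gs : List Int) : (pvCuts gs).getLastD 0 ≤ (gs.length : Int) := by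
  induction gs using List.reverseRecOn with
  | nil => simp [pvCuts]
  | append_singleton gs g ih =>
    rw [pv_cuts_snoc]
    by_cases hg : g > 20
    · simp only [if_pos hg, List.getLastD_concat, List.length_append, List.length_singleton]
      push_cast
      omega
    · simp only [if_neg hg, List.append_nil, List.length_append, List.length_singleton]
      push_cast
      omega

-- The main bridge: segments emitted from the cuts equal A's counter loop, on any gaps list.
theorem pv_main (gs : List Int) :
    pvSegs 0 (pvCuts gs ++ [(gs.length : Int) + 1]) 1 = (pvAfold gs (1, [1])).2
    ∧ (pvAfold gs (1, [1])).1 = 1 + ((pvCuts gs).length : Int) := by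
  induction gs using List.reverseRecOn with
  | nil => constructor <;> simp [pvCuts, pvAfold, pvSegs]
  | append_singleton gs g ih =>
    obtain ⟨ih1, ih2⟩ := ih
    have hlast : (pvCuts gs).getLastD 0 ≤ (gs.length : Int) := pv_cuts_last_le gs
    have hAfold : pvAfold (gs ++ [g]) (1, [1])
        = (fun st g => if g > 20 then (st.1 + 1, st.2 ++ [st.1 + 1]) else (st.1, st.2 ++ [st.1]))
            (pvAfold gs (1, [1])) g := by
      unfold pvAfold; rw [List.foldl_append]; rfl
    rw [pv_cuts_snoc]
    by_cases hg : g > 20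
    · rw [if_pos hg]
      constructor
      · rw [pv_segs_snoc, List.getLastD_concat]
        have h1 : (((gs ++ [g]).length : Int) + 1 - (1 + (gs.length : Int))).toNat = 1 := by
          simp; omega
        rw [h1]
        have h2 : pvSegs 0 (pvCuts gs ++ [1 + (gs.length : Int)]) 1
            = pvSegs 0 (pvCuts gs ++ [(gs.length : Int) + 1]) 1 := by
          rw [add_comm 1 ((gs.length : Int))]
        rw [h2, ih1, hAfold]
        simp only [if_pos hg, ih2, List.length_append, List.length_singleton,
          List.replicate_one]
        congr 2
      · rw [hAfold]
        simp only [if_pos hg, ih2, List.length_append, List.length_singleton]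
        push_cast
        ring
    · rw [if_neg hg, List.append_nil]
      constructor
      · rw [pv_segs_snoc] at ih1 ⊢
        have hk : (((gs ++ [g]).length : Int) + 1 - (pvCuts gs).getLastD 0).toNat
            = ((gs.length : Int) + 1 - (pvCuts gs).getLastD 0).toNat + 1 := by
          simp only [List.length_append, List.length_singleton]
          push_cast
          omega
        rw [hk, List.replicate_succ', ← List.append_assoc, ih1, hAfold]
        simp [hg, ih2]
      · rw [hAfold]
        simp [hg, ih2]

-- A's port, rebased from index loops onto the list of consecutive gaps.
theorem pv_A_eq (x : Int) (rest : List Int) :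
    get_bunch (x :: rest)
    = (pvAfold (List.zipWith (fun a b => b - a) (x :: rest) rest) (1, [1])).2 := by
  unfold get_bunch
  set gaps : List Int := List.zipWith (fun a b => b - a) (x :: rest) rest with hgaps
  have hglen : gaps.length = rest.length := by simp [hgaps]
  have hbound : ((x :: rest).length : Int) - 1 = (gaps.length : Int) := by simp [hglen]
  rw [hbound]
  have hcongr :
      (PySem.List.pyRange 0 (gaps.length : Int) 1).foldl
        (fun (st : Int × List Int) i =>
          if PySem.List.pyGetD (x :: rest) (i + 1) 0 - PySem.List.pyGetD (x :: rest) i 0 > 20 then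
            (st.1 + 1, st.2 ++ [st.1 + 1])
          else
            (st.1, st.2 ++ [st.1])) (1, [1])
      = (PySem.List.pyRange 0 (gaps.length : Int) 1).foldl
        (fun (st : Int × List Int) i =>
          if PySem.List.pyGetD gaps i 0 > 20 then
            (st.1 + 1, st.2 ++ [st.1 + 1])
          else
            (st.1, st.2 ++ [st.1])) (1, [1]) := by
    apply PySem.List.foldl_congr_mem
    intro st i hi
    have hi' := (PySem.List.mem_pyRange_one).1 hi
    have h0 : 0 ≤ i := hi'.1
    have hlt : i < (gaps.length : Int) := hi'.2
    have hk : i.toNat < gaps.length := by omega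
    have hk1 : i.toNat + 1 < (x :: rest).length := by
      simp only [List.length_cons]; omega
    have e1 : PySem.List.pyGetD gaps i 0 = gaps[i.toNat] :=
      PySem.List.pyGetD_eq_getElem gaps 0 h0 (by exact_mod_cast hlt)
    have e2 : PySem.List.pyGetD (x :: rest) i 0 = (x :: rest)[i.toNat] :=
      PySem.List.pyGetD_eq_getElem (x :: rest) 0 h0 (by simp only [List.length_cons]; omega)
    have e3 : PySem.List.pyGetD (x :: rest) (i + 1) 0 = (x :: rest)[i.toNat + 1] := by
      have := PySem.List.pyGetD_eq_getElem (x :: rest) (i := i + 1) 0 (by omega)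
        (by simp only [List.length_cons]; push_cast; omega)
      have ht : (i + 1).toNat = i.toNat + 1 := by omega
      simp only [ht] at this
      exact this
    have egap : gaps[i.toNat] = (x :: rest)[i.toNat + 1] - (x :: rest)[i.toNat] := by
      have : gaps[i.toNat] = rest[i.toNat] - (x :: rest)[i.toNat] := by
        simp [hgaps, List.getElem_zipWith]
      rw [this]
      congr 1
    rw [e1, e2, e3, egap]
  rw [hcongr]
  rw [PySem.List.foldl_pyRange_zero_pyGetD' gaps (0 : Int)
    (fun (st : Int × List Int) g =>
      if g > 20 then (st.1 + 1, st.2 ++ [st.1 + 1]) else (st.1, st.2 ++ [st.1]))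
    ((1 : Int), ([1] : List Int))]
  rfl

-- B's port, rebased onto the gaps list: its cut positions are pvCuts and its emission loop is pvSegs.
theorem pv_B_eq (x : Int) (rest : List Int) :
    get_bunch_alt (x :: rest)
    = pvSegs 0 (pvCuts (List.zipWith (fun a b => b - a) (x :: rest) rest)
        ++ [((List.zipWith (fun a b => b - a) (x :: rest) rest).length : Int) + 1]) 1 := by
  unfold get_bunch_alt
  set gaps : List Int := List.zipWith (fun a b => b - a) (x :: rest) rest with hgaps
  have hglen : gaps.length = rest.length := by simp [hgaps]
  have hm : ((x :: rest).length : Int) = (gaps.length : Int) + 1 := by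
    simp [hglen]
  have hcuts :
      (PySem.List.pyRange 1 ((gaps.length : Int) + 1) 1).filter
        (fun i => decide (PySem.List.pyGetD (x :: rest) i 0 - PySem.List.pyGetD (x :: rest) (i - 1) 0 > 20))
      = pvCuts gaps := by
    rw [PySem.List.pyRange_one]
    have hL : ((gaps.length : Int) + 1 - 1).toNat = gaps.length := by omega
    rw [hL, List.filter_map]
    unfold pvCuts
    refine congrArg (List.map fun k : Nat => (1 : Int) + (k : Int)) (List.filter_congr ?_)
    intro k hk
    have hk' : k < gaps.length := List.mem_range.mp hk
    have hkr : k < rest.length := by omega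
    simp only [Function.comp_apply]
    have c1 : (1 : Int) + (k : Int) = ((k + 1 : Nat) : Int) := by push_cast; ring
    have e1 : PySem.List.pyGetD (x :: rest) ((1 : Int) + (k : Int)) 0 = rest[k] := by
      rw [c1, PySem.List.pyGetD_natCast, List.getD_cons_succ, List.getD_eq_getElem rest 0 hkr]
    have e2 : PySem.List.pyGetD (x :: rest) ((1 : Int) + (k : Int) - 1) 0 = (x :: rest)[k] := by
      have c2 : (1 : Int) + (k : Int) - 1 = ((k : Nat) : Int) := by ring
      rw [c2, PySem.List.pyGetD_natCast,
        List.getD_eq_getElem (x :: rest) 0 (by simp only [List.length_cons]; omega)]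
    have e3 : gaps.getD k 0 = rest[k] - (x :: rest)[k] := by
      rw [List.getD_eq_getElem gaps 0 hk']
      simp [hgaps, List.getElem_zipWith]
    rw [e1, e2, e3]
  simp only [hm, hcuts, List.cons_append]
  rw [List.drop_one]
  simp only [List.tail_cons]
  rw [pv_fold_segs]
  simp

-- ===== VERDICT (by name: the statement is the Claim_ definition above) =====
theorem get_bunch_spec : Claim_unchanged_get_bunch := by
  intro col _ hD
  cases col with
  | nil => exact absurd (show D_get_bunch [] from rfl) hD
  | cons x rest =>
    rw [pv_A_eq, ← (pv_main (List.zipWith (fun a b => b - a) (x :: rest) rest)).1, ← pv_B_eq]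

theorem get_bunch_changed : Claim_changed_get_bunch := by unfold Claim_changed_get_bunch; decide

theorem get_bunch_tight : Claim_exact_get_bunch := by
  intro col _ hD
  unfold D_get_bunch at hD
  subst hD
  decide
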